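-- pv_equiv track=rewrite | github.com/agentsattack/aiopscell | adk_agents/attack_toolkit/token_splitting_attack.py | transform
-- ===== SOURCE A (Python) =====
-- def transform(text: str) -> str:
--     if not text:
--         return ""
--
--     # Zero-width space
--     splitter = '\u200B'
--
--     words = text.split(' ')
--     processed_words = []
--
--     for word in words:
--         # Split long words in the middle to break BPE tokens
--         if len(word) > 1:
--             mid_point = len(word) // 2
--             new_word = word[:mid_point] + splitter + word[mid_point:]
--             processed_words.append(new_word)
--         else:
--             processed_words.append(word)
--
--     return ' '.join(processed_words)
-- ===== SOURCE B (Python) =====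
-- def transform(text: str) -> str:
--     if not text:
--         return ""
--     n = len(text)
--     # Pass 1: compute the set of insertion indices: for each maximal
--     # space-delimited word [start, end) of length > 1, the index start + len//2.
--     cuts = set()
--     start = 0
--     for i, c in enumerate(text):
--         if c == ' ':
--             if i - start > 1:
--                 cuts.add(start + (i - start) // 2)
--             start = i + 1
--     if n - start > 1:
--         cuts.add(start + (n - start) // 2)
--     # Pass 2: emit the characters, inserting a zero-width space before each cut index.
--     out = []
--     for i, c in enumerate(text):
--         if i in cuts:
--             out.append('\u200B')
--         out.append(c)
--     return ''.join(out)
-- ===== Notes on version B (the rewrite author's own statement) =====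
-- stated objective: alternative
-- what changed: Instead of splitting into words and re-joining, B computes in one arithmetic pass the set of insertion indices (word-start + word-length//2 for each space-delimited word longer than 1) and then emits the original characters, inserting the zero-width space at those indices; no word substrings are ever built.
import Mathlib
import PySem

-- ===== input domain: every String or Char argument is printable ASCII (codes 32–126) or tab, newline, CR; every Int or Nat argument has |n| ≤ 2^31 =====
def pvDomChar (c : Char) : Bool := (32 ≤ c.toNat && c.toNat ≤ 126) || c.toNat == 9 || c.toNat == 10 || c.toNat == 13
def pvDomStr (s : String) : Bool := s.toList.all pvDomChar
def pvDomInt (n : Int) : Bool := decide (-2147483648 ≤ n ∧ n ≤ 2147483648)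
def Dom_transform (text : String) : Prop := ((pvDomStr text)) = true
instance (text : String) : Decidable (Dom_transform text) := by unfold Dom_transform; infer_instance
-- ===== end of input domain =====

-- B replaces A's split/word-list/join by two arithmetic passes: one computing the SET of
-- insertion indices (word start + length//2 for each space-delimited word longer than 1),
-- one emitting the original characters with the zero-width space inserted at those indices
-- (alternative algorithm, same cost; no word substrings are built).

-- ===== PORT A =====
-- zero-width space '\u200B'
def pvZwsp : Char := Char.ofNat 8203

def transform (text : String) : String :=
  if text.toList.isEmpty then "" else
    let words := PySem.Chars.splitOn text.toList [' ']
    let processed := words.foldl (fun acc word =>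
      if word.length > 1 then
        let mid : Int := PySem.Int.floordiv (word.length : Int) 2
        acc ++ [PySem.List.slice word none (some mid) ++ [pvZwsp] ++ PySem.List.slice word (some mid) none]
      else
        acc ++ [word]) []
    String.ofList (PySem.Chars.join [' '] processed)

-- ===== PORT B =====
-- the body of Source B's first loop: on a space at index i with word start st, record the
-- cut st + (i-st)//2 when the word is longer than 1 and move the start past the space
def pvCutStep (st : PySem.Set Int × Int) (q : Int × Char) : PySem.Set Int × Int :=
  if q.2 = ' ' then
    ((if q.1 - st.2 > 1 then st.1.add (st.2 + PySem.Int.floordiv (q.1 - st.2) 2) else st.1), q.1 + 1)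
  else st

-- the body of Source B's second loop: copy the character, preceded by the zero-width space
-- when its index is a recorded cut
def pvEmitStep (cuts : PySem.Set Int) (acc : List Char) (q : Int × Char) : List Char :=
  (if cuts.contains q.1 then acc ++ [pvZwsp] else acc) ++ [q.2]

def transform_alt (text : String) : String :=
  if text.toList.isEmpty then "" else
    let cs := text.toList
    let n : Int := (cs.length : Int)
    let p := (PySem.List.enumerate cs 0).foldl pvCutStep (PySem.Set.empty, 0)
    let cuts := if n - p.2 > 1 then p.1.add (p.2 + PySem.Int.floordiv (n - p.2) 2) else p.1
    String.ofList ((PySem.List.enumerate cs 0).foldl (pvEmitStep cuts) [])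

-- ===== PRECONDITION & SPEC =====
def Spec_transform (text : String) (out : String) : Prop := out = transform_alt text
instance (text : String) (out : String) : Decidable (Spec_transform text out) := by unfold Spec_transform; infer_instance

-- ===== CLAIM (what is proved, stated in full; the proofs are below) =====
def Claim_equal_transform : Prop := ∀ (text : String), Dom_transform text → Spec_transform text (transform text)

-- ===== LEMMAS AND PROOFS =====

-- A's per-word rewrite, on the list side
def pvBreak (run : List Char) : List Char :=
  if run.length > 1 then
    let mid := run.length / 2
    run.take mid ++ [pvZwsp] ++ run.drop mid
  else run

-- run-at-a-time characterisation of the common result: a space is copied, a maximal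
-- non-space run is rewritten by pvBreak
def pvScan : List Char → List Char
  | [] => []
  | c :: rest =>
    if c = ' ' then ' ' :: pvScan rest
    else pvBreak (c :: rest.takeWhile (· != ' ')) ++ pvScan (rest.dropWhile (· != ' '))
termination_by cs => cs.length
decreasing_by
  · simp
  · have := List.length_dropWhile_le (fun c => c != ' ') rest
    simp; omega

-- ---------- A side: transform = pvScan ----------

-- the tail of split(' ') after the first word: one piece per following space
def pvRestSplit : List Char → List (List Char)
  | [] => []
  | _ :: rest => rest.takeWhile (· != ' ') :: pvRestSplit (rest.dropWhile (· != ' '))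
termination_by cs => cs.length
decreasing_by
  have := List.length_dropWhile_le (fun c => c != ' ') rest
  simp; omega

theorem pvGo_nil (fuel : Nat) (cur : List Char) (acc : List (List Char)) :
    PySem.Chars.splitOn.go [' '] (fuel+1) [] cur acc = (cur.reverse :: acc).reverse := by
  rw [PySem.Chars.splitOn.go]; omega

theorem pvGo_space (fuel : Nat) (rest cur : List Char) (acc : List (List Char)) :
    PySem.Chars.splitOn.go [' '] (fuel+1) (' '::rest) cur acc
      = PySem.Chars.splitOn.go [' '] fuel rest [] (cur.reverse :: acc) := by
  rw [PySem.Chars.splitOn.go]; simp [List.isPrefixOf]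

theorem pvGo_char (fuel : Nat) (c : Char) (rest cur : List Char) (acc : List (List Char))
    (h : c ≠ ' ') :
    PySem.Chars.splitOn.go [' '] (fuel+1) (c::rest) cur acc
      = PySem.Chars.splitOn.go [' '] fuel rest (c::cur) acc := by
  rw [PySem.Chars.splitOn.go]; simp [List.isPrefixOf, Ne.symm h]

theorem pvGo_spec (fuel : Nat) : ∀ (l cur : List Char) (acc : List (List Char)),
    l.length < fuel →
    PySem.Chars.splitOn.go [' '] fuel l cur acc
      = acc.reverse ++ (cur.reverse ++ l.takeWhile (· != ' ')) :: pvRestSplit (l.dropWhile (· != ' ')) := by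
  induction fuel with
  | zero => intro l cur acc h; omega
  | succ fuel ih =>
    intro l cur acc h
    match l with
    | [] => simp [pvGo_nil, pvRestSplit]
    | c :: rest =>
      by_cases hc : c = ' '
      · subst hc
        rw [pvGo_space, ih rest [] _ (by simpa using h)]
        simp [pvRestSplit]
      · rw [pvGo_char _ _ _ _ _ hc, ih rest (c::cur) _ (by simpa using h)]
        simp [hc]

theorem pvSplitOn_space (cs : List Char) :
    PySem.Chars.splitOn cs [' ']
      = (cs.takeWhile (· != ' ')) :: pvRestSplit (cs.dropWhile (· != ' ')) := by
  show PySem.Chars.splitOn.go [' '] (cs.length + 1) cs [] [] = _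
  rw [pvGo_spec (cs.length + 1) cs [] [] (by omega)]
  simp

theorem pvBreak_eq (word : List Char) :
    (if word.length > 1 then
        PySem.List.slice word none (some (PySem.Int.floordiv (word.length : Int) 2))
          ++ [pvZwsp]
          ++ PySem.List.slice word (some (PySem.Int.floordiv (word.length : Int) 2)) none
      else word) = pvBreak word := by
  unfold pvBreak
  split_ifs with h
  · have hm : PySem.Int.floordiv (word.length : Int) 2 = ((word.length / 2 : Nat) : Int) := by
      exact_mod_cast PySem.Int.floordiv_natCast word.length 2
    rw [hm, PySem.List.slice_to word (by positivity), PySem.List.slice_from word (by positivity)]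
    simp only [Int.toNat_natCast]
  · rfl

theorem pvFold_eq_map (words : List (List Char)) (init : List (List Char)) :
    words.foldl (fun acc word =>
      if word.length > 1 then
        let mid : Int := PySem.Int.floordiv (word.length : Int) 2
        acc ++ [PySem.List.slice word none (some mid) ++ [pvZwsp] ++ PySem.List.slice word (some mid) none]
      else acc ++ [word]) init = init ++ words.map pvBreak := by
  induction words generalizing init with
  | nil => simp
  | cons w ws ih =>
    simp only [List.foldl_cons, List.map_cons, ih]
    rw [← pvBreak_eq w]
    split_ifs <;> simp

theorem pvScan_eq (cs : List Char) :
    pvScan cs = PySem.Chars.join [' '] ((PySem.Chars.splitOn cs [' ']).map pvBreak) := by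
  induction cs using pvScan.induct with
  | case1 =>
    rw [pvScan, pvSplitOn_space]
    simp [pvRestSplit, PySem.Chars.join_singleton, pvBreak]
  | case2 rest ih =>
    rw [pvScan, if_pos rfl, ih, pvSplitOn_space, pvSplitOn_space]
    simp only [List.takeWhile_cons, List.dropWhile_cons]
    simp only [show ((' ' : Char) != ' ') = false from rfl, Bool.false_eq_true,
      ite_false, pvRestSplit]
    simp only [List.map_cons, PySem.Chars.join_cons_cons]
    simp [pvBreak]
  | case3 c rest hc ih =>
    rw [pvScan, if_neg hc, ih, pvSplitOn_space (c :: rest)]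
    have hct : (c != ' ') = true := by simpa using hc
    simp only [List.takeWhile_cons, List.dropWhile_cons, hct, ite_true]
    rcases hd : rest.dropWhile (· != ' ') with _ | ⟨d, ds⟩
    · rw [pvSplitOn_space]
      simp [pvRestSplit, PySem.Chars.join_singleton, pvBreak]
    · have hds : d = ' ' := by
        have h1 : rest.dropWhile (· != ' ') ≠ [] := by simp [hd]
        have := List.head_dropWhile_not (l := rest) (p := (· != ' ')) h1
        simp only [hd, List.head_cons] at this
        simpa using this
      subst hds
      rw [pvSplitOn_space]
      simp only [List.takeWhile_cons, List.dropWhile_cons,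
        show ((' ' : Char) != ' ') = false from rfl, Bool.false_eq_true, ite_false,
        pvRestSplit, List.map_cons, PySem.Chars.join_cons_cons]
      simp [pvBreak]

-- ---------- B side: the two passes compute pvScan ----------

-- the cut indices of cs when its first character has index d
def pvRunCuts : Int → List Char → List Int
  | _, [] => []
  | d, c :: rest =>
    if c = ' ' then pvRunCuts (d + 1) rest
    else
      let L : Nat := (rest.takeWhile (· != ' ')).length + 1
      (if L > 1 then [d + ((L / 2 : Nat) : Int)] else [])
        ++ pvRunCuts (d + (L : Int)) (rest.dropWhile (· != ' '))
termination_by _ cs => cs.length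
decreasing_by
  · simp
  · have := List.length_dropWhile_le (fun c => c != ' ') rest
    simp; omega

-- pass 1 (from pending word start st, head index d) followed by the final-word step
def pvCutsG (st d : Int) (S : PySem.Set Int) (l : List Char) : PySem.Set Int :=
  let p := (PySem.List.enumerate l d).foldl pvCutStep (S, st)
  if (d + (l.length : Int)) - p.2 > 1 then
    p.1.add (p.2 + PySem.Int.floordiv ((d + (l.length : Int)) - p.2) 2)
  else p.1

-- the cut indices still to be produced, char-wise, mirroring the Python loop state
def pvPend : Int → Int → List Char → List Int
  | st, d, [] => if d - st > 1 then [st + PySem.Int.floordiv (d - st) 2] else []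
  | st, d, c :: t =>
    if c = ' ' then
      (if d - st > 1 then [st + PySem.Int.floordiv (d - st) 2] else []) ++ pvPend (d + 1) (d + 1) t
    else pvPend st (d + 1) t

-- pass 2, structurally
def pvEmitList (S : PySem.Set Int) : Int → List Char → List Char
  | _, [] => []
  | d, c :: t => (if S.contains d then [pvZwsp] else []) ++ c :: pvEmitList S (d + 1) t

theorem pvEmit_foldl (S : PySem.Set Int) (cs : List Char) :
    ∀ (d : Int) (acc : List Char),
      (PySem.List.enumerate cs d).foldl (pvEmitStep S) acc = acc ++ pvEmitList S d cs := by
  induction cs with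
  | nil => intro d acc; simp [PySem.List.enumerate_nil, pvEmitList]
  | cons c t ih =>
    intro d acc
    simp only [PySem.List.enumerate_cons, List.foldl_cons, pvEmitList, ih, pvEmitStep]
    split_ifs <;> simp

theorem pvEmitList_append (S : PySem.Set Int) (xs ys : List Char) :
    ∀ (d : Int),
      pvEmitList S d (xs ++ ys) = pvEmitList S d xs ++ pvEmitList S (d + (xs.length : Int)) ys := by
  induction xs with
  | nil => intro d; simp [pvEmitList]
  | cons c t ih =>
    intro d
    simp only [List.cons_append, pvEmitList, ih, List.length_cons]
    have : d + 1 + (t.length : Int) = d + ((t.length + 1 : Nat) : Int) := by push_cast; ring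
    rw [this]
    simp

theorem pvCutsG_mem (l : List Char) : ∀ (d st : Int) (S : PySem.Set Int) (x : Int),
    x ∈ pvCutsG st d S l ↔ x ∈ S ∨ x ∈ pvPend st d l := by
  induction l with
  | nil =>
    intro d st S x
    unfold pvCutsG pvPend
    simp only [PySem.List.enumerate_nil, List.foldl_nil, List.length_nil, Int.natCast_zero, add_zero]
    split_ifs with h
    · simp [PySem.Set.mem_add]
    · simp
  | cons c t ih =>
    intro d st S x
    unfold pvCutsG
    simp only [PySem.List.enumerate_cons, List.foldl_cons]
    by_cases hc : c = ' '
    · subst hc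
      simp only [pvCutStep, if_true]
      have hlen : d + (((' ' :: t).length : Nat) : Int) = (d + 1) + (t.length : Int) := by
        simp only [List.length_cons]; push_cast; ring
      rw [hlen]
      have := ih (d + 1) (d + 1) (if d - st > 1 then S.add (st + PySem.Int.floordiv (d - st) 2) else S) x
      unfold pvCutsG at this
      rw [this, pvPend, if_pos rfl]
      by_cases h : d - st > 1
      · rw [if_pos h, if_pos h]
        simp only [PySem.Set.mem_add, List.mem_append, List.mem_singleton]
        tauto
      · rw [if_neg h, if_neg h]
        simp
    · simp only [pvCutStep, if_neg hc]
      have hlen : d + (((c :: t).length : Nat) : Int) = (d + 1) + (t.length : Int) := by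
        simp only [List.length_cons]; push_cast; ring
      rw [hlen]
      have := ih (d + 1) st S x
      unfold pvCutsG at this
      rw [this]
      conv_rhs => rw [pvPend]
      rw [if_neg hc]

-- a spaceless prefix only advances the head index
theorem pvPend_skip (r : List Char) (h : ∀ c ∈ r, ¬(c = ' ')) :
    ∀ (st d : Int) (l : List Char),
      pvPend st d (r ++ l) = pvPend st (d + (r.length : Int)) l := by
  induction r with
  | nil => intro st d l; simp
  | cons c t ih =>
    intro st d l
    have hc : ¬(c = ' ') := h c (by simp)
    rw [List.cons_append, pvPend, if_neg hc,
      ih (fun x hx => h x (by simp [hx])) st (d + 1) l]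
    congr 1
    simp only [List.length_cons]; push_cast; ring

theorem pvPend_eq_runCuts (d : Int) (cs : List Char) :
    pvPend d d cs = pvRunCuts d cs := by
  induction d, cs using pvRunCuts.induct with
  | case1 d => simp [pvPend, pvRunCuts]
  | case2 d rest ih =>
    rw [pvPend, if_pos rfl, pvRunCuts]
    simp only [show ¬((d : Int) - d > 1) from by omega, ite_false, List.nil_append]
    exact ih
  | case3 d c rest hc Lb ih =>
    have hmem : ∀ x ∈ c :: rest.takeWhile (· != ' '), ¬(x = ' ') := by
      intro x hx
      rcases List.mem_cons.1 hx with h | h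
      · subst h; exact hc
      · have := List.mem_takeWhile_imp h; simpa using this
    conv_lhs => rw [show c :: rest = (c :: rest.takeWhile (· != ' ')) ++ rest.dropWhile (· != ' ') from by simp]
    rw [pvPend_skip _ hmem, pvRunCuts]
    simp only [if_neg hc]
    have hL : ((c :: rest.takeWhile (· != ' ')).length : Int)
        = (((rest.takeWhile (· != ' ')).length + 1 : Nat) : Int) := by simp
    rw [hL]
    set L : Nat := (rest.takeWhile (· != ' ')).length + 1 with hLdef
    have hfd : PySem.Int.floordiv ((L : Int)) 2 = ((L / 2 : Nat) : Int) := by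
      exact_mod_cast PySem.Int.floordiv_natCast L 2
    have ih' : pvPend (d + (L : Int)) (d + (L : Int)) (rest.dropWhile (· != ' '))
        = pvRunCuts (d + (L : Int)) (rest.dropWhile (· != ' ')) := ih
    clear ih
    rcases hdw : rest.dropWhile (· != ' ') with _ | ⟨e, t⟩
    · rw [pvPend]
      have harith : d + (L : Int) - d = (L : Int) := by ring
      rw [hdw] at ih'
      rw [harith, hfd]
      rw [pvRunCuts]
      by_cases hgt : L > 1
      · rw [if_pos (show (L : Int) > 1 from by exact_mod_cast hgt), if_pos hgt]
        simp
      · rw [if_neg (show ¬((L : Int) > 1) from by omega), if_neg hgt]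
        simp
    · have he : e = ' ' := by
        have h1 : rest.dropWhile (· != ' ') ≠ [] := by simp [hdw]
        have := List.head_dropWhile_not (l := rest) (p := (· != ' ')) h1
        simp only [hdw, List.head_cons] at this
        simpa using this
      subst he
      rw [hdw] at ih'
      rw [pvPend, if_pos rfl]
      have harith : d + (L : Int) - d = (L : Int) := by ring
      rw [harith, hfd]
      rw [pvPend, if_pos rfl,
        if_neg (show ¬((d + (L : Int)) - (d + (L : Int)) > 1) from by omega),
        List.nil_append] at ih'
      rw [ih']
      by_cases hgt : L > 1
      · rw [if_pos (show (L : Int) > 1 from by exact_mod_cast hgt), if_pos hgt]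
      · rw [if_neg (show ¬((L : Int) > 1) from by omega), if_neg hgt]

theorem pvRunCuts_bounds (d : Int) (cs : List Char) :
    ∀ x ∈ pvRunCuts d cs, d ≤ x ∧ x < d + cs.length := by
  induction d, cs using pvRunCuts.induct with
  | case1 d => simp [pvRunCuts]
  | case2 d rest ih =>
    intro x hx
    rw [pvRunCuts, if_pos rfl] at hx
    obtain ⟨h1, h2⟩ := ih x hx
    constructor
    · omega
    · simp only [List.length_cons]; push_cast; omega
  | case3 d c rest hc Lb ih =>
    intro x hx
    rw [pvRunCuts, if_neg hc] at hx
    have hlen : (rest.takeWhile (· != ' ')).length + (rest.dropWhile (· != ' ')).length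
        = rest.length := by
      conv_rhs => rw [← List.takeWhile_append_dropWhile (p := (· != ' ')) (l := rest)]
      rw [List.length_append]
    rcases List.mem_append.1 hx with h | h
    · by_cases hgt : (rest.takeWhile (· != ' ')).length + 1 > 1
      · rw [if_pos hgt] at h
        simp only [List.mem_singleton] at h
        subst h
        have h2 : ((rest.takeWhile (· != ' ')).length + 1) / 2
            < (rest.takeWhile (· != ' ')).length + 1 := by omega
        constructor
        · omega
        · simp only [List.length_cons]
          push_cast
          omega
      · rw [if_neg hgt] at h
        simp at h
    · have := ih x h
      constructor
      · omega
      · simp only [List.length_cons] at *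
        push_cast at *
        omega

-- no cut falls in [d, d + |xs|): the characters are copied unchanged
theorem pvEmitList_nocut (S : PySem.Set Int) (xs : List Char) : ∀ (d : Int),
    (∀ i : Nat, i < xs.length → S.contains (d + (i : Int)) = false) →
    pvEmitList S d xs = xs := by
  induction xs with
  | nil => intro d h; simp [pvEmitList]
  | cons c t ih =>
    intro d h
    have h0 : S.contains d = false := by
      have := h 0 (by simp)
      simpa using this
    rw [pvEmitList, h0]
    simp only [Bool.false_eq_true, ite_false, List.nil_append, List.cons.injEq, true_and]
    apply ih
    intro i hi
    have := h (i + 1) (by simp only [List.length_cons]; omega)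
    have harith : d + ((i + 1 : Nat) : Int) = d + 1 + (i : Int) := by push_cast; ring
    rw [harith] at this
    exact this

-- exactly one cut, at offset m: the zero-width space is inserted there
theorem pvEmitList_onecut (S : PySem.Set Int) (xs : List Char) : ∀ (d : Int) (m : Nat),
    m < xs.length →
    (∀ i : Nat, i < xs.length → (S.contains (d + (i : Int)) = true ↔ i = m)) →
    pvEmitList S d xs = xs.take m ++ pvZwsp :: xs.drop m := by
  induction xs with
  | nil => intro d m hm h; simp at hm
  | cons c t ih =>
    intro d m hm h
    match m with
    | 0 =>
      have h0 : S.contains d = true := by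
        have := (h 0 (by simp)).2 rfl
        simpa using this
      have hrest : pvEmitList S (d + 1) t = t := by
        apply pvEmitList_nocut
        intro i hi
        have harith : d + 1 + (i : Int) = d + ((i + 1 : Nat) : Int) := by push_cast; ring
        rw [harith]
        have := h (i + 1) (by simp only [List.length_cons]; omega)
        simp only [Nat.add_eq_zero_iff, and_false, iff_false, one_ne_zero] at this
        exact (Bool.not_eq_true _) ▸ this
      rw [pvEmitList, h0, hrest]
      simp
    | m + 1 =>
      have h0 : S.contains d = false := by
        have := h 0 (by simp)
        simp only [Nat.cast_zero, add_zero, Nat.zero_ne_add_one, iff_false] at this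
        exact (Bool.not_eq_true _) ▸ this
      rw [pvEmitList, h0]
      simp only [Bool.false_eq_true, ite_false, List.nil_append, List.take_succ_cons,
        List.drop_succ_cons, List.cons_append, List.cons.injEq, true_and]
      apply ih
      · simp only [List.length_cons] at hm; omega
      · intro i hi
        have harith : d + 1 + (i : Int) = d + ((i + 1 : Nat) : Int) := by push_cast; ring
        rw [harith]
        have := h (i + 1) (by simp only [List.length_cons]; omega)
        rw [this]
        omega

theorem pvEmitList_eq_scan (S : PySem.Set Int) (cs : List Char) : ∀ (d : Int),
    (∀ x : Int, d ≤ x → x < d + cs.length → (S.contains x = true ↔ x ∈ pvRunCuts d cs)) →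
    pvEmitList S d cs = pvScan cs := by
  induction cs using pvScan.induct with
  | case1 => intro d hyp; simp [pvEmitList, pvScan]
  | case2 rest ih =>
    intro d hyp
    have hnotmem : S.contains d = false := by
      by_cases hb : S.contains d = true
      · have hiff := hyp d (le_refl d) (by simp only [List.length_cons]; push_cast; omega)
        rw [pvRunCuts, if_pos rfl] at hiff
        have := (pvRunCuts_bounds (d + 1) rest) d (hiff.1 hb)
        omega
      · exact (Bool.not_eq_true _) ▸ hb
    rw [pvEmitList, hnotmem, pvScan, if_pos rfl]
    simp only [Bool.false_eq_true, ite_false, List.nil_append, List.cons.injEq, true_and]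
    apply ih
    intro x hx1 hx2
    have := hyp x (by omega) (by simp only [List.length_cons]; push_cast; omega)
    rw [pvRunCuts, if_pos rfl] at this
    exact this
  | case3 c rest hc ih =>
    intro d hyp
    have hlen : (rest.takeWhile (· != ' ')).length + (rest.dropWhile (· != ' ')).length
        = rest.length := by
      conv_rhs => rw [← List.takeWhile_append_dropWhile (p := (· != ' ')) (l := rest)]
      rw [List.length_append]
    set tw := rest.takeWhile (· != ' ') with htw
    set dw := rest.dropWhile (· != ' ') with hdw
    set L : Nat := tw.length + 1 with hLdef
    -- the cut list of c :: rest
    have hrc : pvRunCuts d (c :: rest)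
        = (if L > 1 then [d + ((L / 2 : Nat) : Int)] else []) ++ pvRunCuts (d + (L : Int)) dw := by
      rw [pvRunCuts, if_neg hc]
    have hwin : ((c :: rest).length : Int) = (L : Int) + (dw.length : Int) := by
      simp only [List.length_cons]; push_cast; omega
    -- tail cuts are at index ≥ d + L
    have htail : ∀ x ∈ pvRunCuts (d + (L : Int)) dw, d + (L : Int) ≤ x ∧ x < d + (L : Int) + dw.length :=
      pvRunCuts_bounds (d + (L : Int)) dw
    conv_lhs => rw [show c :: rest = (c :: tw) ++ dw from by rw [htw, hdw]; simp]
    rw [pvEmitList_append, pvScan, if_neg hc]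
    have hLc : ((c :: tw).length : Int) = (L : Int) := by simp [hLdef]
    have hrun : pvEmitList S d (c :: tw) = pvBreak (c :: tw) := by
      by_cases hgt : L > 1
      · rw [pvEmitList_onecut S (c :: tw) d (L / 2) (by simp only [List.length_cons]; omega)]
        · rw [pvBreak, if_pos (by simp only [List.length_cons]; omega)]
          simp only [List.length_cons, hLdef]
          simp
        · intro i hi
          have hi' : i < L := by simpa [hLdef] using hi
          have hx := hyp (d + (i : Int)) (by omega)
            (by rw [hwin]; omega)
          rw [hrc, if_pos hgt] at hx
          simp only [List.mem_append, List.mem_singleton] at hx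
          constructor
          · intro hb
            rcases hx.1 hb with h | h
            · omega
            · have := htail _ h
              omega
          · intro hm
            subst hm
            exact hx.2 (Or.inl rfl)
      · have hL1 : L = 1 := by omega
        have htw0 : tw = [] := by
          have : tw.length = 0 := by omega
          exact List.length_eq_zero_iff.1 this
        rw [htw0]
        rw [pvBreak, if_neg (by simp)]
        apply pvEmitList_nocut
        intro i hi
        simp only [List.length_cons, List.length_nil] at hi
        have hi0 : i = 0 := by omega
        subst hi0
        by_cases hb : S.contains (d + ((0 : Nat) : Int)) = true
        · exfalso
          have hx := hyp (d + ((0 : Nat) : Int)) (by omega) (by rw [hwin]; push_cast; omega)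
          rw [hrc, if_neg hgt] at hx
          simp only [List.nil_append] at hx
          have := htail _ (hx.1 hb)
          omega
        · exact (Bool.not_eq_true _) ▸ hb
    rw [hrun, hLc]
    have hrest : pvEmitList S (d + (L : Int)) dw = pvScan dw := by
      apply ih
      intro x hx1 hx2
      have hx := hyp x (by omega) (by rw [hwin]; omega)
      rw [hrc] at hx
      simp only [List.mem_append] at hx
      constructor
      · intro hb
        rcases hx.1 hb with h | h
        · by_cases hgt : L > 1
          · rw [if_pos hgt] at h
            simp only [List.mem_singleton] at h
            subst h
            have : (L / 2 : Nat) < L := by omega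
            omega
          · rw [if_neg hgt] at h; simp at h
        · exact h
      · intro hm
        exact hx.2 (Or.inr hm)
    rw [hrest]

-- ===== VERDICT (by name: the statement is the Claim_ definition above) =====
theorem transform_spec : Claim_equal_transform := by
  intro text _
  unfold Spec_transform transform transform_alt
  split_ifs with h
  · rfl
  · simp only [pvFold_eq_map, List.nil_append, ← pvScan_eq]
    rw [pvEmit_foldl, List.nil_append]
    congr 1
    have hcuts : (if (text.toList.length : Int) -
          ((PySem.List.enumerate text.toList 0).foldl pvCutStep (PySem.Set.empty, 0)).2 > 1 then
        ((PySem.List.enumerate text.toList 0).foldl pvCutStep (PySem.Set.empty, 0)).1.add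
          (((PySem.List.enumerate text.toList 0).foldl pvCutStep (PySem.Set.empty, 0)).2 +
            PySem.Int.floordiv ((text.toList.length : Int) -
              ((PySem.List.enumerate text.toList 0).foldl pvCutStep (PySem.Set.empty, 0)).2) 2)
      else ((PySem.List.enumerate text.toList 0).foldl pvCutStep (PySem.Set.empty, 0)).1)
        = pvCutsG 0 0 PySem.Set.empty text.toList := by
      unfold pvCutsG
      simp
    rw [hcuts]
    symm
    apply pvEmitList_eq_scan
    intro x hx1 hx2
    rw [PySem.Set.contains_iff, pvCutsG_mem, pvPend_eq_runCuts]
    simp [PySem.Set.empty]
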